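-- pv_equiv track=rewrite | github.com/VolatileDream/advent-of-code | 2020/day-10/main.py | split_on_delta
-- ===== SOURCE A (Python) =====
-- def split_on_delta(jolts):
--   out = []
--   acc = [0]
--   prev = 0
--   for i in jolts:
--     acc.append(i)
--     if abs(i - prev) == 3:
--       out.append(acc)
--       acc = [i]
--
--     prev = i
--
--   if acc:
--     out.append(acc)
--   return out
-- ===== SOURCE B (Python) =====
-- def split_on_delta(jolts):
--   # Two-pass decomposition: collect delta-3 boundary indices of the zero-prefixed list, then cut overlapping slices.
--   full = [0] + jolts
--   n = len(full)
--   bnds = [k for k in range(1, n) if abs(full[k] - full[k - 1]) == 3]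
--   starts = [0] + bnds
--   ends = [b + 1 for b in bnds] + [n]
--   return [full[s:e] for s, e in zip(starts, ends)]
-- ===== Notes on version B (the rewrite author's own statement) =====
-- stated objective: alternative
-- what changed: Replaces A's single-pass mutable accumulator loop by a two-pass index/slice decomposition: collect the delta-3 boundary indices of the zero-prefixed list, then emit the overlapping slices between consecutive boundaries.
import Mathlib
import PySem

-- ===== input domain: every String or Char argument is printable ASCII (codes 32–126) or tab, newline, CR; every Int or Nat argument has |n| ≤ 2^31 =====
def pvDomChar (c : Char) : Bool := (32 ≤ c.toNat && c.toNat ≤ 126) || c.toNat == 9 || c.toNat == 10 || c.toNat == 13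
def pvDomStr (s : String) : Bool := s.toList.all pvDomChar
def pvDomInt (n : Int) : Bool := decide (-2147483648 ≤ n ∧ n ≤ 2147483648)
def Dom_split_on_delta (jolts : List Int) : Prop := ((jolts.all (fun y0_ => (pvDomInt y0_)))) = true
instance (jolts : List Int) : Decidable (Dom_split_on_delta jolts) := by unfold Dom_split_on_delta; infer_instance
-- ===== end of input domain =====

-- B replaces A's one-pass mutable-accumulator loop by a two-pass boundary-index + overlapping-slice
-- decomposition (objective: alternative; same result, including the shared boundary elements).

-- ===== PORT A =====
-- loop state = (out, acc, prev); one step of A's for-body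
def aStep (s : List (List Int) × List Int × Int) (i : Int) : List (List Int) × List Int × Int :=
  let acc := s.2.1 ++ [i]
  if (i - s.2.2).natAbs = 3 then (s.1 ++ [acc], [i], i) else (s.1, acc, i)

def split_on_delta (jolts : List Int) : List (List Int) :=
  let st := jolts.foldl aStep ([], [0], 0)
  if st.2.1 ≠ [] then st.1 ++ [st.2.1] else st.1

-- ===== PORT B =====
def split_on_delta_alt (jolts : List Int) : List (List Int) :=
  let full : List Int := 0 :: jolts
  let n : Int := full.length
  let bnds := (PySem.List.pyRange 1 n 1).filter
    (fun k => (PySem.List.pyGetD full k 0 - PySem.List.pyGetD full (k - 1) 0).natAbs == 3)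
  let starts := 0 :: bnds
  let ends := bnds.map (· + 1) ++ [n]
  (starts.zip ends).map (fun se => PySem.List.slice full (some se.1) (some se.2))

-- ===== PRECONDITION & SPEC =====
def Spec_split_on_delta (jolts : List Int) (out : List (List Int)) : Prop := out = split_on_delta_alt jolts
instance (jolts : List Int) (out : List (List Int)) : Decidable (Spec_split_on_delta jolts out) := by unfold Spec_split_on_delta; infer_instance

-- ===== CLAIM (what is proved, stated in full; the proofs are below) =====
def Claim_equal_split_on_delta : Prop := ∀ (jolts : List Int), Dom_split_on_delta jolts → Spec_split_on_delta jolts (split_on_delta jolts)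

-- ===== LEMMAS AND PROOFS =====

-- common recursive characterisation: the groups of (prev :: rest)
def goG (prev : Int) : List Int → List (List Int)
  | [] => [[prev]]
  | i :: r =>
    if (i - prev).natAbs = 3 then [prev, i] :: goG i r
    else
      match goG i r with
      | [] => []        -- unreachable: goG is never []
      | g :: gs => (prev :: g) :: gs

theorem headI_cons_tail' {α : Type} [Inhabited α] (l : List α) (h : l ≠ []) : l.headI :: l.tail = l := by
  cases l with
  | nil => exact absurd rfl h
  | cons a t => simp

theorem goG_ne_nil (prev : Int) (l : List Int) : goG prev l ≠ [] := by
  cases l with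
  | nil => simp [goG]
  | cons i r =>
    simp only [goG]
    split
    · simp
    · cases h : goG i r with
      | nil => exact absurd h (goG_ne_nil i r)
      | cons g gs => simp

theorem goG_cons_neg (prev i : Int) (r : List Int) (h : ¬ (i - prev).natAbs = 3) :
    goG prev (i :: r) = (prev :: (goG i r).headI) :: (goG i r).tail := by
  simp only [goG, if_neg h]
  cases hg : goG i r with
  | nil => exact absurd hg (goG_ne_nil i r)
  | cons g gs => simp

-- ---- A-side ----
theorem a_loop (rest : List Int) : ∀ (out : List (List Int)) (pre : List Int) (prev : Int),
    (rest.foldl aStep (out, pre ++ [prev], prev)).1 ++ [(rest.foldl aStep (out, pre ++ [prev], prev)).2.1]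
    = out ++ (pre ++ (goG prev rest).headI) :: (goG prev rest).tail := by
  induction rest with
  | nil => intro out pre prev; simp [goG]
  | cons i r ih =>
    intro out pre prev
    by_cases h : (i - prev).natAbs = 3
    · have step : aStep (out, pre ++ [prev], prev) i
          = (out ++ [pre ++ [prev] ++ [i]], ([] : List Int) ++ [i], i) := by
        simp [aStep, h]
      rw [List.foldl_cons, step, ih]
      simp only [goG, if_pos h, List.nil_append, List.headI_cons, List.tail_cons]
      rw [headI_cons_tail' _ (goG_ne_nil i r)]
      simp
    · have step : aStep (out, pre ++ [prev], prev) i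
          = (out, (pre ++ [prev]) ++ [i], i) := by
        simp [aStep, h]
      rw [List.foldl_cons, step, ih, goG_cons_neg prev i r h]
      simp

theorem a_acc_ne_nil (rest : List Int) : ∀ (s : List (List Int) × List Int × Int),
    s.2.1 ≠ [] → (rest.foldl aStep s).2.1 ≠ [] := by
  induction rest with
  | nil => intro s h; exact h
  | cons i r ih =>
    intro s h
    rw [List.foldl_cons]
    apply ih
    unfold aStep
    split <;> simp

theorem a_eq_goG (jolts : List Int) : split_on_delta jolts = goG 0 jolts := by
  unfold split_on_delta
  have hne : (jolts.foldl aStep ([], [0], 0)).2.1 ≠ [] :=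
    a_acc_ne_nil jolts ([], [0], 0) (by simp)
  simp only [hne, if_pos, ne_eq, not_false_eq_true]
  have := a_loop jolts [] [] 0
  simp only [List.nil_append] at this
  rw [show (([], [0], 0) : List (List Int) × List Int × Int) = ([], [] ++ [0], 0) by simp] at *
  rw [this, headI_cons_tail' _ (goG_ne_nil 0 jolts)]

-- ---- B-side ----
def pB (f : List Int) : List Int :=
  (PySem.List.pyRange 1 (f.length : Int) 1).filter
    (fun k => (PySem.List.pyGetD f k 0 - PySem.List.pyGetD f (k - 1) 0).natAbs == 3)

def bAux (f : List Int) : List (List Int) :=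
  ((0 :: pB f).zip ((pB f).map (· + 1) ++ [(f.length : Int)])).map
    (fun se => PySem.List.slice f (some se.1) (some se.2))

theorem alt_eq_bAux (jolts : List Int) : split_on_delta_alt jolts = bAux (0 :: jolts) := rfl

theorem pyRange_succ_map (a b : Int) :
    PySem.List.pyRange (a + 1) (b + 1) 1 = (PySem.List.pyRange a b 1).map (· + 1) := by
  rw [PySem.List.pyRange_one, PySem.List.pyRange_one]
  have : b + 1 - (a + 1) = b - a := by ring
  rw [this, List.map_map]
  apply List.map_congr_left
  intro k _
  simp only [Function.comp_apply]
  ring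

theorem pyGetD_cons_succ' (x d : Int) (t : List Int) (j : Int) (h : 0 ≤ j) :
    PySem.List.pyGetD (x :: t) (j + 1) d = PySem.List.pyGetD t j d := by
  obtain ⟨n, rfl⟩ := Int.eq_ofNat_of_zero_le h
  have : ((n : Int) + 1) = ((n + 1 : Nat) : Int) := by push_cast; ring
  rw [this, PySem.List.pyGetD_natCast, PySem.List.pyGetD_natCast]
  simp

theorem pyGetD_cons_pos (x d : Int) (t : List Int) (k : Int) (h : 1 ≤ k) :
    PySem.List.pyGetD (x :: t) k d = PySem.List.pyGetD t (k - 1) d := by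
  have := pyGetD_cons_succ' x d t (k - 1) (by omega)
  simpa using this

theorem slice_cons_succ (x : Int) (t : List Int) (s e : Int) (hs : 0 ≤ s) (he : 0 ≤ e) :
    PySem.List.slice (x :: t) (some (s + 1)) (some (e + 1)) = PySem.List.slice t (some s) (some e) := by
  rw [PySem.List.slice_toNat _ (by omega) (by omega), PySem.List.slice_toNat _ hs he]
  have h1 : (s + 1).toNat = s.toNat + 1 := by omega
  have h2 : (e + 1).toNat = e.toNat + 1 := by omega
  rw [h1, h2]
  simp

theorem slice_cons_zero_succ (x : Int) (t : List Int) (e : Int) (he : 0 ≤ e) :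
    PySem.List.slice (x :: t) (some 0) (some (e + 1)) = x :: PySem.List.slice t (some 0) (some e) := by
  rw [PySem.List.slice_toNat _ (by omega) (by omega), PySem.List.slice_toNat _ (by omega) he]
  have h2 : (e + 1).toNat = e.toNat + 1 := by omega
  rw [h2]
  simp

theorem pB_pos (f : List Int) (k : Int) (h : k ∈ pB f) : 1 ≤ k := by
  unfold pB at h
  have := (List.mem_filter.mp h).1
  exact ((PySem.List.mem_pyRange_one).mp this).1

theorem pB_cons (x y : Int) (r : List Int) :
    pB (x :: y :: r) = (if ((y - x).natAbs == 3) = true then [1] else []) ++ (pB (y :: r)).map (· + 1) := by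
  unfold pB
  have hlen : (((x :: y :: r).length : Nat) : Int) = (((y :: r).length : Nat) : Int) + 1 := by
    simp
  rw [hlen]
  rw [PySem.List.pyRange_one_cons (by simp only [List.length_cons]; push_cast; omega)]
  rw [pyRange_succ_map 1 ((y :: r).length : Int)]
  rw [List.filter_cons, List.filter_map]
  have e1 : PySem.List.pyGetD (x :: y :: r) 1 0 = y := by
    rw [pyGetD_cons_pos x 0 (y :: r) 1 le_rfl]
    norm_num [PySem.List.pyGetD_zero_cons]
  have e0 : PySem.List.pyGetD (x :: y :: r) (1 - 1) 0 = x := by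
    norm_num [PySem.List.pyGetD_zero_cons]
  have hfc : List.filter
      ((fun k => (PySem.List.pyGetD (x :: y :: r) k 0 - PySem.List.pyGetD (x :: y :: r) (k - 1) 0).natAbs == 3)
        ∘ (· + 1))
      (PySem.List.pyRange 1 ((y :: r).length : Int) 1)
    = List.filter
      (fun k => (PySem.List.pyGetD (y :: r) k 0 - PySem.List.pyGetD (y :: r) (k - 1) 0).natAbs == 3)
      (PySem.List.pyRange 1 ((y :: r).length : Int) 1) := by
    apply List.filter_congr
    intro k hk
    have hk1 : 1 ≤ k := (PySem.List.mem_pyRange_one.mp hk).1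
    have a1 : PySem.List.pyGetD (x :: y :: r) (k + 1) 0 = PySem.List.pyGetD (y :: r) k 0 :=
      pyGetD_cons_succ' x 0 (y :: r) k (by omega)
    have a2 : PySem.List.pyGetD (x :: y :: r) (k + 1 - 1) 0 = PySem.List.pyGetD (y :: r) (k - 1) 0 := by
      rw [show k + 1 - 1 = k by ring]
      exact pyGetD_cons_pos x 0 (y :: r) k hk1
    simp only [Function.comp_apply, a1, a2]
  rw [hfc]
  by_cases hc : ((y - x).natAbs == 3) = true
  · simp [e1, hc]
  · simp [e1, hc]

theorem mem_ends_nonneg (t : List Int) (e : Int)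
    (h : e ∈ (pB t).map (· + 1) ++ [((t.length : Nat) : Int)]) : 0 ≤ e := by
  rcases List.mem_append.mp h with h | h
  · obtain ⟨b, hb, rfl⟩ := List.mem_map.mp h
    have := pB_pos t b hb
    omega
  · simp only [List.mem_singleton] at h
    subst h
    positivity

theorem map_slice_shift (x : Int) (t S E : List Int)
    (hS : ∀ s ∈ S, 0 ≤ s) (hE : ∀ e ∈ E, 0 ≤ e) :
    ((S.map (· + 1)).zip (E.map (· + 1))).map
        (fun se => PySem.List.slice (x :: t) (some se.1) (some se.2))
      = (S.zip E).map (fun se => PySem.List.slice t (some se.1) (some se.2)) := by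
  rw [List.zip_map, List.map_map]
  apply List.map_congr_left
  intro se hse
  obtain ⟨h1, h2⟩ := List.of_mem_zip hse
  obtain ⟨s, e⟩ := se
  simp only [Function.comp_apply, Prod.map]
  exact slice_cons_succ x t s e (hS s h1) (hE e h2)

theorem b_eq_goG (t : List Int) : ∀ x : Int, bAux (x :: t) = goG x t := by
  induction t with
  | nil =>
    intro x
    unfold bAux pB
    rw [PySem.List.pyRange_one_eq_nil (by norm_num)]
    simp only [List.filter_nil, List.map_nil, List.nil_append, List.zip_cons_cons,
      List.zip_nil_right, List.map_cons, List.map_nil, goG]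
    rw [PySem.List.slice_zero_start, PySem.List.slice_to _ (by norm_num)]
    simp
  | cons y r ih =>
    intro x
    unfold bAux
    rw [pB_cons]
    have hlen : (((x :: y :: r).length : Nat) : Int) = (((y :: r).length : Nat) : Int) + 1 := by simp
    rw [hlen]
    have hSnn : ∀ s ∈ (0 :: pB (y :: r)), 0 ≤ s := by
      intro s hs
      rcases List.mem_cons.mp hs with rfl | hs
      · exact le_rfl
      · have := pB_pos _ _ hs; omega
    have hEnn : ∀ e ∈ (pB (y :: r)).map (· + 1) ++ [(((y :: r).length : Nat) : Int)], 0 ≤ e :=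
      fun e he => mem_ends_nonneg (y :: r) e he
    by_cases hc : ((y - x).natAbs == 3) = true
    · rw [if_pos hc]
      have hc3 : (y - x).natAbs = 3 := by simpa using hc
      simp only [List.nil_append, List.map_cons, List.cons_append, List.zip_cons_cons]
      have h1 : ((1 : Int) :: (pB (y :: r)).map (· + 1)) = (0 :: pB (y :: r)).map (· + 1) := by
        simp
      have h2 : ((pB (y :: r)).map (· + 1)).map (· + 1) ++ [(((y :: r).length : Nat) : Int) + 1]
          = ((pB (y :: r)).map (· + 1) ++ [(((y :: r).length : Nat) : Int)]).map (· + 1) := by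
        simp
      rw [h1, h2, map_slice_shift x (y :: r) _ _ hSnn hEnn]
      have hhead : PySem.List.slice (x :: y :: r) (some 0) (some (1 + 1)) = [x, y] := by
        rw [PySem.List.slice_zero_start, PySem.List.slice_to _ (by norm_num)]
        rfl
      rw [hhead]
      have hb : ((0 :: pB (y :: r)).zip
            ((pB (y :: r)).map (· + 1) ++ [(((y :: r).length : Nat) : Int)])).map
          (fun se => PySem.List.slice (y :: r) (some se.1) (some se.2)) = bAux (y :: r) := rfl
      rw [hb, ih y]
      simp [goG, hc3]
    · rw [if_neg hc]
      have hc3 : ¬ (y - x).natAbs = 3 := by simpa using hc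
      simp only [List.nil_append]
      obtain ⟨e0, et', hE⟩ : ∃ e0 et',
          (pB (y :: r)).map (· + 1) ++ [(((y :: r).length : Nat) : Int)] = e0 :: et' := by
        cases h : (pB (y :: r)).map (· + 1) with
        | nil => exact ⟨(((y :: r).length : Nat) : Int), [], rfl⟩
        | cons a l => exact ⟨a, l ++ [(((y :: r).length : Nat) : Int)], rfl⟩
      have he0 : 0 ≤ e0 := hEnn e0 (by rw [hE]; exact List.mem_cons_self)
      have het' : ∀ e ∈ et', 0 ≤ e := fun e he => hEnn e (by rw [hE]; exact List.mem_cons_of_mem _ he)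
      have h2 : ((pB (y :: r)).map (· + 1)).map (· + 1) ++ [(((y :: r).length : Nat) : Int) + 1]
          = (e0 + 1) :: et'.map (· + 1) := by
        have : ((pB (y :: r)).map (· + 1)).map (· + 1) ++ [(((y :: r).length : Nat) : Int) + 1]
            = ((pB (y :: r)).map (· + 1) ++ [(((y :: r).length : Nat) : Int)]).map (· + 1) := by
          simp
        rw [this, hE]
        simp
      rw [h2]
      simp only [List.zip_cons_cons, List.map_cons]
      rw [slice_cons_zero_succ x (y :: r) e0 he0]
      have hBnn : ∀ s ∈ pB (y :: r), 0 ≤ s := fun s hs => by have := pB_pos _ _ hs; omega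
      rw [map_slice_shift x (y :: r) _ _ hBnn het']
      have hbt : bAux (y :: r)
          = PySem.List.slice (y :: r) (some 0) (some e0)
            :: ((pB (y :: r)).zip et').map
                (fun se => PySem.List.slice (y :: r) (some se.1) (some se.2)) := by
        unfold bAux
        rw [hE]
        simp
      rw [goG_cons_neg x y r hc3, ← ih y, hbt]
      simp

-- ===== VERDICT (by name: the statement is the Claim_ definition above) =====
theorem split_on_delta_spec : Claim_equal_split_on_delta := by
  intro jolts _
  unfold Spec_split_on_delta
  rw [a_eq_goG, alt_eq_bAux, b_eq_goG]
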